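-- pv_equiv track=rewrite | github.com/kafka4/pareo | pareo_md.py | zero_dec
-- ===== SOURCE A (Python) =====
-- def zero_dec(words):
--     flag = False
--     dec = ''
--     for w in words:
--         if w == '#':
--             flag = True
--             continue
--         if w.isdecimal() == False:
--             flag = False
--
--         if flag == True:
--             dec += w
--
--     if len(dec) == 1:
--         new = words.replace('#'+ dec, '#0' + dec)
--     else:
--         new = words
--
--     return new
-- ===== SOURCE B (Python) =====
-- def zero_dec(words):
--     runs = []
--     i = 0
--     n = len(words)
--     while i < n:
--         if words[i] == '#':
--             j = i + 1
--             while j < n and words[j].isdecimal():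
--                 j += 1
--             runs.append(words[i + 1:j])
--             i = j
--         else:
--             i += 1
--     dec = ''.join(runs)
--     if len(dec) == 1:
--         return words.replace('#' + dec, '#0' + dec)
--     return words
-- ===== Notes on version B (the rewrite author's own statement) =====
-- stated objective: alternative
-- what changed: Replaces A's boolean-flag per-character state machine accumulating one string with an index scan that slices out the digit run following each hash mark, collects the runs in a list and joins them before the same final replace.
import Mathlib
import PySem

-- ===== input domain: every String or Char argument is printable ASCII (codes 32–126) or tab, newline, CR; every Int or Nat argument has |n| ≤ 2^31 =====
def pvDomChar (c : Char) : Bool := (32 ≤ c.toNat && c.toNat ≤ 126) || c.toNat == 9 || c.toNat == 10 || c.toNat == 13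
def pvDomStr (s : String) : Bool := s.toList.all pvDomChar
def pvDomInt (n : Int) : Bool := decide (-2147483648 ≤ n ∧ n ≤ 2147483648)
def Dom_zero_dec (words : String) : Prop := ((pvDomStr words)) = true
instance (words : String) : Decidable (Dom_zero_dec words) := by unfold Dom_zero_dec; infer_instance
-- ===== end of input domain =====

-- B replaces A's boolean-flag per-character state machine by a scan that slices out the digit
-- run after each hash mark and joins the collected runs (objective: alternative decomposition, same cost).
-- Python's c.isdecimal() is ported as PySem.Chars.isdigit, exact on the ASCII domain Dom_zero_dec.

-- ===== PORT A =====
def zero_dec (words : String) : String :=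
  -- flag/dec accumulator loop, dec kept as List Char (Python builds it with +=)
  let st := words.toList.foldl
    (fun (st : Bool × List Char) w =>
      if w = '#' then (true, st.2)          -- flag = True; continue
      else
        let flag := if PySem.Chars.isdigit w = false then false else st.1
        if flag = true then (flag, st.2 ++ [w]) else (flag, st.2))
    (false, [])
  let dec := st.2
  if dec.length = 1 then
    PySem.Str.replace words (String.ofList ('#' :: dec)) (String.ofList ('#' :: '0' :: dec))
  else words

-- ===== PORT B =====
-- port of Source B's scan: the outer while loop over index i becomes structural recursion on
-- the remaining characters; the inner run loop's slices words[i+1:j] / resume point j are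
-- takeWhile/dropWhile isdigit on the tail (ported by hand, exact).
def zdRuns : List Char → List (List Char)
  | [] => []
  | c :: cs =>
    if c = '#' then
      cs.takeWhile PySem.Chars.isdigit :: zdRuns (cs.dropWhile PySem.Chars.isdigit)
    else zdRuns cs
termination_by cs => cs.length
decreasing_by
  · have := List.length_dropWhile_le (p := PySem.Chars.isdigit) (l := cs)
    simp; omega
  · simp

def zero_dec_alt (words : String) : String :=
  let dec := PySem.Chars.join [] (zdRuns words.toList)
  if dec.length = 1 then
    PySem.Str.replace words (String.ofList ('#' :: dec)) (String.ofList ('#' :: '0' :: dec))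
  else words

-- ===== PRECONDITION & SPEC =====
def Spec_zero_dec (words : String) (out : String) : Prop := out = zero_dec_alt words
instance (words : String) (out : String) : Decidable (Spec_zero_dec words out) := by unfold Spec_zero_dec; infer_instance

-- ===== CLAIM (what is proved, stated in full; the proofs are below) =====
def Claim_equal_zero_dec : Prop := ∀ (words : String), Dom_zero_dec words → Spec_zero_dec words (zero_dec words)

-- ===== LEMMAS AND PROOFS =====

theorem zdRuns_nil : zdRuns [] = [] := by
  rw [zdRuns]

theorem zdRuns_hash (cs : List Char) :
    zdRuns ('#' :: cs)
      = cs.takeWhile PySem.Chars.isdigit :: zdRuns (cs.dropWhile PySem.Chars.isdigit) := by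
  rw [zdRuns]; simp

theorem zdRuns_other (c : Char) (cs : List Char) (h : c ≠ '#') :
    zdRuns (c :: cs) = zdRuns cs := by
  rw [zdRuns]; simp [h]

theorem join_nil_cons (x : List Char) (xs : List (List Char)) :
    PySem.Chars.join [] (x :: xs) = x ++ PySem.Chars.join [] xs := by
  cases xs <;> simp [PySem.Chars.join, List.intercalate]

-- loop invariant: the fold's dec equals acc ++ the joined runs (with a pending run iff flag)
theorem foldl_eq_runs (cs : List Char) (flag : Bool) (acc : List Char) :
    (cs.foldl
      (fun (st : Bool × List Char) w =>
        if w = '#' then (true, st.2)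
        else
          let flag := if PySem.Chars.isdigit w = false then false else st.1
          if flag = true then (flag, st.2 ++ [w]) else (flag, st.2))
      (flag, acc)).2
      = acc ++ (if flag then
            cs.takeWhile PySem.Chars.isdigit
              ++ PySem.Chars.join [] (zdRuns (cs.dropWhile PySem.Chars.isdigit))
          else PySem.Chars.join [] (zdRuns cs)) := by
  induction cs generalizing flag acc with
  | nil => cases flag <;> simp [zdRuns_nil, PySem.Chars.join, List.intercalate]
  | cons c cs ih =>
    by_cases hc : c = '#'
    · subst hc
      have hd : PySem.Chars.isdigit '#' = false := by decide
      simp only [List.foldl_cons, ih]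
      cases flag <;> simp [hd, zdRuns_hash, join_nil_cons]
    · by_cases hdig : PySem.Chars.isdigit c = true
      · cases flag with
        | false =>
          simp only [List.foldl_cons, if_neg hc, hdig, ih, zdRuns_other c cs hc]
          simp
        | true =>
          simp only [List.foldl_cons, if_neg hc, hdig, ih]
          simp [hdig]
      · have hdig' : PySem.Chars.isdigit c = false := by
          cases h : PySem.Chars.isdigit c
          · rfl
          · exact absurd h hdig
        simp only [List.foldl_cons, if_neg hc, hdig', ih, zdRuns_other c cs hc]
        cases flag <;> simp [hdig', zdRuns_other c cs hc]

-- ===== VERDICT (by name: the statement is the Claim_ definition above) =====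
theorem zero_dec_spec : Claim_equal_zero_dec := by
  intro words _
  unfold Spec_zero_dec
  simp only [zero_dec, zero_dec_alt, foldl_eq_runs]
  simp
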